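-- pv_equiv track=rewrite | github.com/BaileyU03/AdventOfCode2024 | day02.py | line_checker
-- ===== SOURCE A (Python) =====
-- def line_checker(line, is_increasing, dampener=False):
--     safe = True
--     for i in range(len(line) - 1):
--         if is_increasing and not (1 <= line[i + 1] - line[i] <= 3):
--             if dampener:
--                 new_line1 = line[:]
--                 new_line1.pop(i)
--                 new_line2 = line[:]
--                 new_line2.pop(i + 1)
--                 return (line_checker(new_line1, True) or line_checker(new_line1, False)
--                         or line_checker(new_line2, True) or line_checker(new_line2, False))
--             safe = False
--         if not is_increasing and not (1 <= line[i] - line[i + 1] <= 3):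
--             if dampener:
--                 new_line1 = line[:]
--                 new_line1.pop(i)
--                 new_line2 = line[:]
--                 new_line2.pop(i + 1)
--                 return (line_checker(new_line1, True) or line_checker(new_line1, False)
--                         or line_checker(new_line2, True) or line_checker(new_line2, False))
--             safe = False
--     return safe
-- ===== SOURCE B (Python) =====
-- def _ok(d, increasing):
--     return 1 <= (d if increasing else -d) <= 3
--
--
-- def _remove_at(ds, j):
--     # difference list of the value list with element j removed:
--     # merging ds[j-1] and ds[j] into their sum (or dropping the end one)
--     if j == 0:
--         return ds[1:]
--     if j == len(ds):
--         return ds[:-1]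
--     return ds[:j - 1] + [ds[j - 1] + ds[j]] + ds[j + 1:]
--
--
-- def line_checker(line, is_increasing, dampener=False):
--     ds = [b - a for a, b in zip(line, line[1:])]
--     i = 0
--     while i < len(ds) and _ok(ds[i], is_increasing):
--         i += 1
--     if i == len(ds):
--         return True
--     if not dampener:
--         return False
--     a = _remove_at(ds, i)
--     b = _remove_at(ds, i + 1)
--     return (all(_ok(d, True) for d in a) or all(_ok(d, False) for d in a)
--             or all(_ok(d, True) for d in b) or all(_ok(d, False) for d in b))
-- ===== Notes on version B (the rewrite author's own statement) =====
-- stated objective: alternative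
-- what changed: B works on the adjacent-difference list instead of the value list: one zipWith pass computes the differences, the scan and the safety checks are over differences only, and the dampener's element removal becomes merging two adjacent differences into their sum (or dropping an end difference) -- no value list is rebuilt and no recursion is used.
import Mathlib
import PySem

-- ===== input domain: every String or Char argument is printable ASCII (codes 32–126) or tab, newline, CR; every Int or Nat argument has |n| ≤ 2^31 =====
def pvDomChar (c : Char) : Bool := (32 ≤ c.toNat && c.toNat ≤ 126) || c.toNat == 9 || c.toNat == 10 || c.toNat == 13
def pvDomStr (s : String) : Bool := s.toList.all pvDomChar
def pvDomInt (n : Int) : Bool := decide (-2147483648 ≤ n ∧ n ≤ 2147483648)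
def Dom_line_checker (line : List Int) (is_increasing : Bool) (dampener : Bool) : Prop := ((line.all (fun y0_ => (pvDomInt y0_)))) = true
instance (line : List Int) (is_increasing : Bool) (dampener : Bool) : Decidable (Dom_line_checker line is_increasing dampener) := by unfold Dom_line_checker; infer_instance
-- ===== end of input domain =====

-- B re-represents the problem over the adjacent-difference list: one zipWith pass, a scan for
-- the first out-of-range difference, and the dampener's element removal done by merging two
-- adjacent differences into their sum (objective: alternative; same asymptotic cost).


-- ===== PORT A =====
-- the for-loop of A, index i, accumulator `safe`; the dampener branch's `line_checker(new, d)`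
-- calls (default dampener=False) become `lcGo new d false 0 true`; `pop(k)` on a copy is
-- `take k ++ drop (k+1)` (k is in range here)
def lcGo (line : List Int) (is_increasing : Bool) (dampener : Bool) (i : Nat) (safe : Bool) : Bool :=
  if _h : i + 1 < line.length then
    if is_increasing && !(decide (1 ≤ line.getD (i+1) 0 - line.getD i 0 ∧ line.getD (i+1) 0 - line.getD i 0 ≤ 3)) then
      if dampener then
        let new_line1 := line.take i ++ line.drop (i+1)
        let new_line2 := line.take (i+1) ++ line.drop (i+2)
        lcGo new_line1 true false 0 true || lcGo new_line1 false false 0 true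
          || lcGo new_line2 true false 0 true || lcGo new_line2 false false 0 true
      else lcGo line is_increasing dampener (i+1) false
    else if !is_increasing && !(decide (1 ≤ line.getD i 0 - line.getD (i+1) 0 ∧ line.getD i 0 - line.getD (i+1) 0 ≤ 3)) then
      if dampener then
        let new_line1 := line.take i ++ line.drop (i+1)
        let new_line2 := line.take (i+1) ++ line.drop (i+2)
        lcGo new_line1 true false 0 true || lcGo new_line1 false false 0 true
          || lcGo new_line2 true false 0 true || lcGo new_line2 false false 0 true
      else lcGo line is_increasing dampener (i+1) false
    else lcGo line is_increasing dampener (i+1) safe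
  else safe
termination_by (line.length, line.length - i)
decreasing_by
  all_goals first
    | · exact Prod.Lex.left _ _ (by simp [List.length_take, List.length_drop]; omega)
    | · exact Prod.Lex.right _ (by omega)

def line_checker (line : List Int) (is_increasing : Bool) (dampener : Bool) : Bool :=
  lcGo line is_increasing dampener 0 true

-- ===== PORT B =====
-- _ok(d, increasing)
def okD (d : Int) (inc : Bool) : Bool :=
  decide (1 ≤ (if inc then d else -d) ∧ (if inc then d else -d) ≤ 3)

-- [b - a for a, b in zip(line, line[1:])]
def pyDiffs (line : List Int) : List Int := List.zipWith (fun a b => b - a) line line.tail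

-- the `while i < len(ds) and _ok(ds[i], is_increasing): i += 1` loop; returns the final i
def scanD (ds : List Int) (inc : Bool) (i : Nat) : Nat :=
  if i < ds.length then
    if okD (ds.getD i 0) inc then scanD ds inc (i+1) else i
  else i
termination_by ds.length - i

-- _remove_at(ds, j); the slices ds[1:], ds[:-1], ds[:j-1], ds[j+1:] are exact as
-- drop/take here since ds is nonempty in every call and 0 ≤ j ≤ len(ds)
def removeAtD (ds : List Int) (j : Nat) : List Int :=
  if j = 0 then ds.drop 1
  else if j = ds.length then ds.take (ds.length - 1)
  else ds.take (j-1) ++ [ds.getD (j-1) 0 + ds.getD j 0] ++ ds.drop (j+1)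

def line_checker_alt (line : List Int) (is_increasing : Bool) (dampener : Bool) : Bool :=
  let ds := pyDiffs line
  let i := scanD ds is_increasing 0
  if i = ds.length then true
  else if !dampener then false
  else
    let a := removeAtD ds i
    let b := removeAtD ds (i+1)
    a.all (okD · true) || a.all (okD · false) || b.all (okD · true) || b.all (okD · false)

-- ===== PRECONDITION & SPEC =====
def Spec_line_checker (line : List Int) (is_increasing : Bool) (dampener : Bool) (out : Bool) : Prop := out = line_checker_alt line is_increasing dampener
instance (line : List Int) (is_increasing : Bool) (dampener : Bool) (out : Bool) : Decidable (Spec_line_checker line is_increasing dampener out) := by unfold Spec_line_checker; infer_instance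

-- ===== CLAIM (what is proved, stated in full; the proofs are below) =====
def Claim_equal_line_checker : Prop := ∀ (line : List Int) (is_increasing : Bool) (dampener : Bool), Dom_line_checker line is_increasing dampener → Spec_line_checker line is_increasing dampener (line_checker line is_increasing dampener)

-- ===== LEMMAS AND PROOFS =====

-- characterization helpers for A's loop (proof-side only)
def firstViolGo (line : List Int) (increasing : Bool) (i : Nat) : Option Nat :=
  if i + 1 < line.length then
    if decide (1 ≤ (if increasing then line.getD (i+1) 0 - line.getD i 0 else line.getD i 0 - line.getD (i+1) 0)
         ∧ (if increasing then line.getD (i+1) 0 - line.getD i 0 else line.getD i 0 - line.getD (i+1) 0) ≤ 3) then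
      firstViolGo line increasing (i+1)
    else some i
  else none
termination_by line.length - i

def fvNone (line : List Int) (inc : Bool) : Bool :=
  match firstViolGo line inc 0 with | none => true | some _ => false

def fvOr (line : List Int) (j : Nat) : Bool :=
  fvNone (line.take j ++ line.drop (j+1)) true || fvNone (line.take j ++ line.drop (j+1)) false
    || fvNone (line.take (j+1) ++ line.drop (j+2)) true || fvNone (line.take (j+1) ++ line.drop (j+2)) false

theorem fv_viol_true {line : List Int} {i : Nat} (h1 : i + 1 < line.length)
    (hc : ¬(1 ≤ line.getD (i+1) 0 - line.getD i 0 ∧ line.getD (i+1) 0 - line.getD i 0 ≤ 3)) :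
    firstViolGo line true i = some i := by
  rw [firstViolGo, if_pos h1, if_neg]
  simpa using hc

theorem fv_viol_false {line : List Int} {i : Nat} (h1 : i + 1 < line.length)
    (hc : ¬(1 ≤ line.getD i 0 - line.getD (i+1) 0 ∧ line.getD i 0 - line.getD (i+1) 0 ≤ 3)) :
    firstViolGo line false i = some i := by
  rw [firstViolGo, if_pos h1, if_neg]
  simpa using hc

theorem fv_ok {line : List Int} {inc : Bool} {i : Nat} (h1 : i + 1 < line.length)
    (hok : (1 ≤ (if inc then line.getD (i+1) 0 - line.getD i 0 else line.getD i 0 - line.getD (i+1) 0)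
       ∧ (if inc then line.getD (i+1) 0 - line.getD i 0 else line.getD i 0 - line.getD (i+1) 0) ≤ 3)) :
    firstViolGo line inc i = firstViolGo line inc (i+1) := by
  rw [firstViolGo, if_pos h1, if_pos]
  simpa using hok

theorem lcGo_eq (line : List Int) (inc damp : Bool) (i : Nat) (safe : Bool) :
    lcGo line inc damp i safe =
      (match firstViolGo line inc i with
       | none => safe
       | some j => if damp then fvOr line j else false) := by
  fun_induction lcGo line inc damp i safe with
  | case1 =>
      rename_i line inc i safe h1 h2 n1 n2 ihA ihB ihC ihD
      simp only [Bool.and_eq_true, Bool.not_eq_true', decide_eq_false_iff_not] at h2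
      obtain ⟨hinc, hc⟩ := h2
      subst hinc
      rw [fv_viol_true h1 hc, ihA, ihB, ihC, ihD]
      simp only [fvOr, fvNone, Bool.false_eq_true, if_false]
      rfl
  | case2 =>
      rename_i line inc damp i safe h1 h2 h3 ih
      simp only [Bool.and_eq_true, Bool.not_eq_true', decide_eq_false_iff_not] at h2
      obtain ⟨hinc, hc⟩ := h2
      subst hinc
      simp only [Bool.not_eq_true] at h3
      subst h3
      rw [fv_viol_true h1 hc, ih]
      cases h5 : firstViolGo line true (i+1) <;> simp [h5]
  | case3 =>
      rename_i line inc i safe h1 h2 h3 n1 n2 ihA ihB ihC ihD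
      simp only [Bool.and_eq_true, Bool.not_eq_true', decide_eq_false_iff_not,
        Bool.not_eq_eq_eq_not, Bool.not_true] at h3
      obtain ⟨hinc, hc⟩ := h3
      subst hinc
      rw [fv_viol_false h1 hc, ihA, ihB, ihC, ihD]
      simp only [fvOr, fvNone, Bool.false_eq_true, if_false]
      rfl
  | case4 =>
      rename_i line inc damp i safe h1 h2 h3 h4 ih
      simp only [Bool.and_eq_true, Bool.not_eq_true', decide_eq_false_iff_not,
        Bool.not_eq_eq_eq_not, Bool.not_true] at h3
      obtain ⟨hinc, hc⟩ := h3
      subst hinc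
      simp only [Bool.not_eq_true] at h4
      subst h4
      rw [fv_viol_false h1 hc, ih]
      cases h5 : firstViolGo line false (i+1) <;> simp [h5]
  | case5 =>
      rename_i line inc damp i safe h1 h2 h3 ih
      have hok : (1 ≤ (if inc then line.getD (i+1) 0 - line.getD i 0 else line.getD i 0 - line.getD (i+1) 0)
         ∧ (if inc then line.getD (i+1) 0 - line.getD i 0 else line.getD i 0 - line.getD (i+1) 0) ≤ 3) := by
        cases inc <;> simp_all
      rw [fv_ok h1 hok, ih]
  | case6 =>
      rename_i line inc damp i safe h1
      rw [firstViolGo, if_neg h1]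

-- bridge: diff list basics
theorem pyDiffs_length (line : List Int) : (pyDiffs line).length = line.length - 1 := by
  simp [pyDiffs]

theorem pyDiffs_getElem (l : List Int) (k : Nat) (h : k + 1 < l.length) :
    (pyDiffs l)[k]'(by simp [pyDiffs]; omega) = l[k+1]'h - l[k]'(by omega) := by
  simp [pyDiffs, List.getElem_zipWith, List.getElem_tail]

theorem pyDiffs_getD (line : List Int) (i : Nat) (h : i + 1 < line.length) :
    (pyDiffs line).getD i 0 = line.getD (i+1) 0 - line.getD i 0 := by
  have hlen : i < (pyDiffs line).length := by rw [pyDiffs_length]; omega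
  rw [List.getD_eq_getElem _ _ hlen, List.getD_eq_getElem _ _ h,
    List.getD_eq_getElem _ _ (by omega : i < line.length)]
  exact pyDiffs_getElem line i h

theorem okD_cond (line : List Int) (inc : Bool) (i : Nat) (h : i + 1 < line.length) :
    okD ((pyDiffs line).getD i 0) inc =
      decide (1 ≤ (if inc then line.getD (i+1) 0 - line.getD i 0 else line.getD i 0 - line.getD (i+1) 0)
         ∧ (if inc then line.getD (i+1) 0 - line.getD i 0 else line.getD i 0 - line.getD (i+1) 0) ≤ 3) := by
  rw [pyDiffs_getD line i h, okD]
  cases inc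
  · simp only [Bool.false_eq_true, if_false]
    rw [decide_eq_decide]
    omega
  · rfl

theorem scanD_cases (ds : List Int) (inc : Bool) (i : Nat) :
    scanD ds inc i ≤ ds.length ∨ scanD ds inc i = i := by
  fun_induction scanD ds inc i with
  | case1 i h1 h2 ih =>
      rcases ih with h | h
      · exact Or.inl h
      · exact Or.inl (by omega)
  | case2 i h1 h2 => exact Or.inl (by omega)
  | case3 i h1 => exact Or.inr rfl

theorem scanD_le (ds : List Int) (inc : Bool) (i : Nat) (h : i ≤ ds.length) :
    scanD ds inc i ≤ ds.length := by
  rcases scanD_cases ds inc i with h2 | h2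
  · exact h2
  · omega

-- A's first-violation scan = B's index scan over the diff list
theorem fv_eq_scan (line : List Int) (inc : Bool) (i : Nat) :
    firstViolGo line inc i =
      (if scanD (pyDiffs line) inc i < (pyDiffs line).length
       then some (scanD (pyDiffs line) inc i) else none) := by
  fun_induction firstViolGo line inc i with
  | case1 i h1 hc ih =>
      have hi : i < (pyDiffs line).length := by rw [pyDiffs_length]; omega
      have hok : okD ((pyDiffs line).getD i 0) inc = true := by
        rw [okD_cond line inc i h1]; exact hc
      have heq : scanD (pyDiffs line) inc i = scanD (pyDiffs line) inc (i+1) := by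
        rw [scanD, if_pos hi, if_pos hok]
      rw [heq]; exact ih
  | case2 i h1 hc =>
      have hi : i < (pyDiffs line).length := by rw [pyDiffs_length]; omega
      have hbad : ¬ okD ((pyDiffs line).getD i 0) inc = true := by
        rw [okD_cond line inc i h1]; simpa using hc
      have heq : scanD (pyDiffs line) inc i = i := by
        rw [scanD, if_pos hi, if_neg hbad]
      rw [heq, if_pos hi]
  | case3 i h1 =>
      have hi : ¬ i < (pyDiffs line).length := by rw [pyDiffs_length]; omega
      rw [scanD, if_neg hi, if_neg hi]

-- scanD reaches the end iff all diffs from i on are in range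
theorem scanD_all (ds : List Int) (inc : Bool) (i : Nat) (h : i ≤ ds.length) :
    (scanD ds inc i = ds.length) ↔ (∀ k, i ≤ k → ∀ hk : k < ds.length, okD ds[k] inc = true) := by
  revert h
  fun_induction scanD ds inc i with
  | case1 i h1 h2 ih =>
      intro h
      rw [ih (by omega)]
      constructor
      · intro hall k hik hk
        rcases Nat.eq_or_lt_of_le hik with rfl | hlt
        · rw [← List.getD_eq_getElem ds 0 hk]; exact h2
        · exact hall k hlt hk
      · intro hall k hik hk
        exact hall k (by omega) hk
  | case2 i h1 h2 =>
      intro h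
      constructor
      · intro heq; omega
      · intro hall
        exact absurd (by rw [List.getD_eq_getElem ds 0 h1]; exact hall i le_rfl h1) h2
  | case3 i h1 =>
      intro h
      have : i = ds.length := by omega
      subst this
      simp only [true_iff]
      intro k hk1 hk2
      omega

theorem all_iff_getElem (ds : List Int) (inc : Bool) :
    ds.all (okD · inc) = true ↔ (∀ k, ∀ hk : k < ds.length, okD ds[k] inc = true) := by
  rw [List.all_eq_true]
  constructor
  · intro h k hk; exact h ds[k] (List.getElem_mem hk)
  · intro h x hx
    obtain ⟨k, hk, rfl⟩ := List.mem_iff_getElem.mp hx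
    exact h k hk

theorem fvNone_eq_all (L : List Int) (inc : Bool) :
    fvNone L inc = (pyDiffs L).all (okD · inc) := by
  rw [fvNone]
  rw [fv_eq_scan L inc 0]
  have hle := scanD_le (pyDiffs L) inc 0 (Nat.zero_le _)
  by_cases h : scanD (pyDiffs L) inc 0 < (pyDiffs L).length
  · rw [if_pos h]
    have : ¬ ((pyDiffs L).all (okD · inc) = true) := by
      rw [all_iff_getElem]
      intro hall
      have := (scanD_all (pyDiffs L) inc 0 (Nat.zero_le _)).mpr (fun k _ hk => hall k hk)
      omega
    simp [this]
  · rw [if_neg h]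
    have heq : scanD (pyDiffs L) inc 0 = (pyDiffs L).length := by omega
    have hall := (scanD_all (pyDiffs L) inc 0 (Nat.zero_le _)).mp heq
    have : (pyDiffs L).all (okD · inc) = true := (all_iff_getElem _ _).mpr (fun k hk => hall k (Nat.zero_le _) hk)
    simp [this]

theorem removed_getElem_lt (l : List Int) (j k : Nat) (hj : j ≤ l.length) (hk : k < l.length - 1) (h : k < j) :
    (l.take j ++ l.drop (j+1))[k]'(by simp; omega) = l[k]'(by omega) := by
  rw [List.getElem_append_left (by simp; omega)]
  simp [List.getElem_take]
theorem removed_getElem_ge (l : List Int) (j k : Nat) (hj : j ≤ l.length) (hk : k < l.length - 1) (h : ¬ k < j) :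
    (l.take j ++ l.drop (j+1))[k]'(by simp; omega) = l[k+1]'(by omega) := by
  rw [List.getElem_append_right (by simp; omega)]
  simp only [List.length_take, List.getElem_drop]
  congr 1
  omega

theorem removed_length (l : List Int) (j : Nat) (hj : j ≤ l.length - 1) :
    (l.take j ++ l.drop (j+1)).length = l.length - 1 := by
  simp only [List.length_append, List.length_take, List.length_drop]
  omega

theorem removed_getD (l : List Int) (j k : Nat) (hj : j ≤ l.length - 1) (hk : k < l.length - 1) :
    (l.take j ++ l.drop (j+1)).getD k 0 = if k < j then l.getD k 0 else l.getD (k+1) 0 := by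
  have hb : k < (l.take j ++ l.drop (j+1)).length := by rw [removed_length l j hj]; omega
  by_cases h : k < j
  · rw [if_pos h, List.getD_eq_getElem _ _ hb, removed_getElem_lt l j k (by omega) hk h,
      List.getD_eq_getElem _ _ (by omega)]
  · rw [if_neg h, List.getD_eq_getElem _ _ hb, removed_getElem_ge l j k (by omega) hk h,
      List.getD_eq_getElem _ _ (by omega)]

theorem removeAtD_length (ds : List Int) (j : Nat) (hj : j ≤ ds.length) :
    (removeAtD ds j).length = ds.length - 1 := by
  rw [removeAtD]; split_ifs <;> simp <;> omega

theorem removeAtD_getD (ds : List Int) (j k : Nat) (hj : j ≤ ds.length) (hk : k < ds.length - 1) :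
    (removeAtD ds j).getD k 0 =
      if k + 1 < j then ds.getD k 0
      else if k + 1 = j ∧ j < ds.length then ds.getD (j-1) 0 + ds.getD j 0
      else ds.getD (k+1) 0 := by
  rw [removeAtD]
  by_cases h0 : j = 0
  · subst h0
    rw [if_pos rfl]
    rw [if_neg (by omega), if_neg (by simp)]
    rw [List.getD_eq_getElem _ _ (by simp; omega), List.getElem_drop,
      ← List.getD_eq_getElem ds 0]
    congr 1
    omega
  · by_cases hl : j = ds.length
    · rw [if_neg h0, if_pos hl]
      rw [if_pos (by omega), List.getD_eq_getElem _ _ (by simp; omega), List.getElem_take,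
        List.getD_eq_getElem _ _ (by omega)]
    · rw [if_neg h0, if_neg hl]
      have hjlen : j < ds.length := by omega
      have hlen : (ds.take (j-1) ++ [ds.getD (j-1) 0 + ds.getD j 0]).length = j := by
        simp; omega
      by_cases hk1 : k + 1 < j
      · rw [if_pos hk1]
        rw [List.getD_eq_getElem _ _ (by simp; omega),
          List.getElem_append_left (by rw [hlen]; omega),
          List.getElem_append_left (by simp; omega),
          List.getElem_take, List.getD_eq_getElem _ _ (by omega)]
      · by_cases hk2 : k + 1 = j
        · rw [if_neg hk1, if_pos ⟨hk2, hjlen⟩]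
          rw [List.getD_eq_getElem _ _ (by simp; omega),
            List.getElem_append_left (by rw [hlen]; omega),
            List.getElem_append_right (by simp; omega)]
          simp only [List.length_take]
          rw [List.getElem_singleton]
        · rw [if_neg hk1, if_neg (by tauto)]
          rw [List.getD_eq_getElem _ _ (by simp; omega),
            List.getElem_append_right (by rw [hlen]; omega),
            List.getElem_drop, ← List.getD_eq_getElem ds 0]
          congr 1
          rw [hlen]
          omega

theorem diffs_remove (line : List Int) (j : Nat) (hj : j ≤ (pyDiffs line).length) :
    pyDiffs (line.take j ++ line.drop (j+1)) = removeAtD (pyDiffs line) j := by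
  have hn := pyDiffs_length line
  rw [pyDiffs_length] at hj
  apply List.ext_getElem
  · rw [pyDiffs_length, removed_length line j (by omega), removeAtD_length _ j (by omega)]
    omega
  · intro k h1 h2
    have hk : k < line.length - 2 := by
      rw [pyDiffs_length, removed_length line j (by omega)] at h1; omega
    rw [← List.getD_eq_getElem _ 0 h1, ← List.getD_eq_getElem _ 0 h2]
    rw [pyDiffs_getD (line.take j ++ line.drop (j+1)) k (by rw [removed_length line j (by omega)]; omega)]
    rw [removed_getD line j k (by omega) (by omega)]
    rw [removed_getD line j (k+1) (by omega) (by omega)]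
    rw [removeAtD_getD (pyDiffs line) j k (by rw [pyDiffs_length]; omega) (by rw [pyDiffs_length]; omega)]
    by_cases c1 : k + 1 < j
    · rw [if_pos c1, if_pos c1, if_pos (show k < j by omega), pyDiffs_getD line k (by omega)]
    · by_cases c2 : k + 1 = j
      · rw [if_neg c1, if_neg c1, if_pos (show k < j by omega),
          if_pos (show k + 1 = j ∧ j < (pyDiffs line).length from ⟨c2, by omega⟩),
          pyDiffs_getD line (j-1) (by omega), pyDiffs_getD line j (by omega),
          show j - 1 + 1 = j from by omega, show k + 1 = j from c2, show k = j - 1 from by omega]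
        ring
      · rw [if_neg c1, if_neg c1, if_neg (show ¬ k < j by omega),
          if_neg (show ¬ (k + 1 = j ∧ j < (pyDiffs line).length) from fun h => c2 h.1),
          pyDiffs_getD line (k+1) (by omega)]

theorem main_eq (line : List Int) (inc damp : Bool) :
    line_checker line inc damp = line_checker_alt line inc damp := by
  have hle := scanD_le (pyDiffs line) inc 0 (Nat.zero_le _)
  rw [line_checker, lcGo_eq, fv_eq_scan line inc 0]
  simp only [line_checker_alt]
  by_cases h : scanD (pyDiffs line) inc 0 < (pyDiffs line).length
  · rw [if_pos h, if_neg (by omega : ¬ scanD (pyDiffs line) inc 0 = (pyDiffs line).length)]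
    cases damp
    · simp
    · simp only [Bool.not_true, Bool.false_eq_true, if_false, if_true]
      simp only [fvOr]
      rw [fvNone_eq_all, fvNone_eq_all, fvNone_eq_all, fvNone_eq_all,
        diffs_remove line _ (by omega), diffs_remove line _ (by omega)]
  · rw [if_neg h, if_pos (by omega)]

-- ===== VERDICT (by name: the statement is the Claim_ definition above) =====
theorem line_checker_spec : Claim_equal_line_checker := by
  intro line inc damp _
  unfold Spec_line_checker
  exact main_eq line inc damp
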